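-- pv_equiv track=rewrite | github.com/JeongHunHui/coding-test-practice | 프로그래머스/lv2/42626. 더 맵게/더 맵게.py | solution
-- ===== SOURCE A (Python) =====
-- import heapq
--
-- def solution(scoville, K):
--     heapq.heapify(scoville)
--     answer = 0
--     while len(scoville) > 1:
--         min_scoville = heapq.heappop(scoville)
--         if min_scoville >= K: break
--         second_scoville = heapq.heappop(scoville)
--         heapq.heappush(scoville, min_scoville + second_scoville * 2)
--         answer += 1
--     return answer if heapq.heappop(scoville) >= K else -1
-- ===== SOURCE B (Python) =====
-- from collections import deque
--
-- def solution(scoville, K):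
--     # Two sorted FIFO queues instead of a heap: `base` holds the sorted
--     # originals, `merged` the combined values (which arise in nondecreasing
--     # order, so it stays sorted); the overall minimum is one of the two fronts.
--     base = deque(sorted(scoville))
--     merged = deque()
--
--     def pop_min():
--         if not merged or (base and base[0] <= merged[0]):
--             return base.popleft()
--         return merged.popleft()
--
--     answer = 0
--     while len(base) + len(merged) > 1:
--         a = pop_min()
--         if a >= K:
--             return answer
--         b = pop_min()
--         merged.append(a + 2 * b)
--         answer += 1
--     return answer if pop_min() >= K else -1
-- ===== Notes on version B (the rewrite author's own statement) =====
-- stated objective: alternative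
-- what changed: Replaces heapq (heapify + repeated heappop/heappush) with one initial sort and two FIFO deques — the sorted originals and the combined values, which arise in nondecreasing order — picking each minimum by comparing the two fronts; B does not mutate the scoville argument, while A heapifies/pops it in place.
import Mathlib
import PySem

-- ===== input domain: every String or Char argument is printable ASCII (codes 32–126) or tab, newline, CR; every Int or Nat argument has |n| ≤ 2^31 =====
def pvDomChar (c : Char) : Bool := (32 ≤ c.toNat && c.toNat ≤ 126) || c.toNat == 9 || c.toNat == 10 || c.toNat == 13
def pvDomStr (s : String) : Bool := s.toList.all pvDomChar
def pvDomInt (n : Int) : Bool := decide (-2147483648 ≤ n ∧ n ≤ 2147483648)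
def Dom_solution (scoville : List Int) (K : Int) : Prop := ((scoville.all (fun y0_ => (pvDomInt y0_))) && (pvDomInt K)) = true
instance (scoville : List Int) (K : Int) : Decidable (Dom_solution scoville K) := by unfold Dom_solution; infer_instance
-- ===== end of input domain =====

-- B replaces A's binary heap by one sort plus two sorted FIFO queues (alternative decomposition, same cost class).
-- Equivalence is about the RETURN value only: Python A mutates its `scoville` argument in place (heapify/heappop), B does not.

-- ===== PORT A =====
-- heapq on a list of ints, ported by its contract on int values (exact for ints, where equal
-- values are indistinguishable): heappop extracts a minimal element (min? + remove? of its
-- first occurrence), heappush appends to the pool.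

def popA (xs : List Int) : Int × List Int :=
  match PySem.List.min? xs (fun x => x) with
  | none => (-1, xs)
  | some m => (m, (PySem.List.remove? xs m).getD xs)

lemma popA_length (xs : List Int) (h : xs ≠ []) : (popA xs).2.length + 1 = xs.length := by
  rcases hx : PySem.List.min? xs (fun x => x) with _ | m
  · exact absurd ((PySem.List.min?_eq_none_iff xs _).mp hx) h
  · have hm : m ∈ xs := PySem.List.min?_mem hx
    have hp := List.length_pos_of_mem hm
    simp only [popA, hx, PySem.List.remove?_eq_some_erase xs m hm, Option.getD_some,
      List.length_erase, hm, if_pos]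
    omega

def solutionLoop (xs : List Int) (K answer : Int) : Int :=
  if h : 1 < xs.length then
    let p := popA xs
    if p.1 ≥ K then (if (popA p.2).1 ≥ K then answer else -1)
    else
      let q := popA p.2
      solutionLoop (q.2 ++ [p.1 + q.1 * 2]) K (answer + 1)
  else (if (popA xs).1 ≥ K then answer else -1)
termination_by xs.length
decreasing_by
  have hne : xs ≠ [] := by intro e; subst e; simp at h
  have h1 := popA_length xs hne
  have hne2 : (popA xs).2 ≠ [] := by
    intro e
    rw [e] at h1
    simp only [List.length_nil] at h1
    omega
  have h2 := popA_length _ hne2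
  simp only [List.length_append, List.length_cons, List.length_nil]
  omega


def solution (scoville : List Int) (K : Int) : Int :=
  solutionLoop scoville K 0

-- ===== PORT B =====
def popMin2 (base merged : List Int) : Int × List Int × List Int :=
  match base, merged with
  | [], [] => (-1, [], [])
  | b :: bt, [] => (b, bt, [])
  | [], m :: mt => (m, [], mt)
  | b :: bt, m :: mt => if b ≤ m then (b, bt, m :: mt) else (m, b :: bt, mt)

lemma popMin2_length (base merged : List Int) (h : base ++ merged ≠ []) :
    (popMin2 base merged).2.1.length + (popMin2 base merged).2.2.length + 1 =
      base.length + merged.length := by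
  match base, merged with
  | [], [] => simp at h
  | b :: bt, [] => simp [popMin2]
  | [], m :: mt => simp [popMin2]
  | b :: bt, m :: mt =>
    by_cases hbm : b ≤ m <;> simp [popMin2, hbm] <;> omega

def altLoop (base merged : List Int) (K answer : Int) : Int :=
  if h : 1 < base.length + merged.length then
    let p := popMin2 base merged
    if p.1 ≥ K then answer
    else
      let q := popMin2 p.2.1 p.2.2
      altLoop q.2.1 (q.2.2 ++ [p.1 + 2 * q.1]) K (answer + 1)
  else
    if (popMin2 base merged).1 ≥ K then answer else -1
termination_by base.length + merged.length
decreasing_by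
  have h1 := popMin2_length base merged
    (by intro e; have h0 : (base ++ merged).length = 0 := by rw [e]; rfl
        simp only [List.length_append] at h0; omega)
  have h2 := popMin2_length (popMin2 base merged).2.1 (popMin2 base merged).2.2
    (by intro e
        have h0 : ((popMin2 base merged).2.1 ++ (popMin2 base merged).2.2).length = 0 := by
          rw [e]; rfl
        simp only [List.length_append] at h0; omega)
  simp only [List.length_append, List.length_cons, List.length_nil]
  omega


def solution_alt (scoville : List Int) (K : Int) : Int :=
  altLoop (PySem.List.sorted scoville (fun x => x) false) [] K 0

-- ===== PRECONDITION & SPEC =====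
-- Pre_ excludes only the empty list, on which A's final heappop raises IndexError (B raises there too).
def Pre_solution (scoville : List Int) (K : Int) : Prop := scoville ≠ []
instance (scoville : List Int) (K : Int) : Decidable (Pre_solution scoville K) := by
  unfold Pre_solution; infer_instance
def pvWitness_solution : List Int × Int := ([2, 5, 1], 7)

def Spec_solution (scoville : List Int) (K : Int) (out : Int) : Prop := out = solution_alt scoville K
instance (scoville : List Int) (K : Int) (out : Int) : Decidable (Spec_solution scoville K out) := by
  unfold Spec_solution; infer_instance

-- ===== CLAIM (what is proved, stated in full; the proofs are below) =====
def Claim_equal_solution : Prop := ∀ (scoville : List Int) (K : Int), Dom_solution scoville K → Pre_solution scoville K → Spec_solution scoville K (solution scoville K)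

-- ===== LEMMAS AND PROOFS =====
def pvF (p : Int × Int) : Int := p.1 + 2 * p.2

def PairsOK (base : List Int) (ps : List (Int × Int)) : Prop :=
  (∀ p ∈ ps, p.1 ≤ p.2) ∧
  ps.Pairwise (fun p q => p.1 ≤ q.1 ∧ p.2 ≤ q.2 ∧ q.2 ≤ pvF p) ∧
  (∀ p ∈ ps, ∀ y ∈ base, p.2 ≤ y)

lemma pairs_sorted (ps : List (Int × Int))
    (h : ps.Pairwise (fun p q => p.1 ≤ q.1 ∧ p.2 ≤ q.2 ∧ q.2 ≤ pvF p)) :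
    (ps.map pvF).Pairwise (· ≤ ·) := by
  refine List.Pairwise.map pvF (fun a b hab => ?_) h
  simp only [pvF]; omega

lemma popA_spec (xs : List Int) (h : xs ≠ []) :
    xs.Perm ((popA xs).1 :: (popA xs).2) ∧ ∀ y ∈ xs, (popA xs).1 ≤ y := by
  rcases hx : PySem.List.min? xs (fun x => x) with _ | m
  · exact absurd ((PySem.List.min?_eq_none_iff xs _).mp hx) h
  · have hm : m ∈ xs := PySem.List.min?_mem hx
    have hmin : ∀ y ∈ xs, m ≤ y := PySem.List.min?_isMin hx
    simp only [popA, hx, PySem.List.remove?_eq_some_erase xs m hm, Option.getD_some]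
    exact ⟨List.perm_cons_erase hm, hmin⟩

lemma popMin2_cases (base merged : List Int) (h : base ++ merged ≠ []) :
    (∃ x bt, base = x :: bt ∧ popMin2 base merged = (x, bt, merged)) ∨
    (∃ x mt, merged = x :: mt ∧ popMin2 base merged = (x, base, mt)) := by
  match base, merged with
  | [], [] => simp at h
  | b :: bt, [] => left; exact ⟨b, bt, rfl, rfl⟩
  | [], m :: mt => right; exact ⟨m, mt, rfl, rfl⟩
  | b :: bt, m :: mt =>
    by_cases hbm : b ≤ m
    · left; exact ⟨b, bt, rfl, by simp [popMin2, hbm]⟩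
    · right; exact ⟨m, mt, rfl, by simp [popMin2, hbm]⟩

lemma popMin2_min (base merged : List Int)
    (hb : base.Pairwise (· ≤ ·)) (hm : merged.Pairwise (· ≤ ·)) :
    ∀ y ∈ base ++ merged, (popMin2 base merged).1 ≤ y := by
  match base, merged with
  | [], [] => simp
  | b :: bt, [] =>
    intro y hy
    simp only [List.append_nil, List.mem_cons] at hy
    rcases hy with rfl | hy
    · simp [popMin2]
    · simpa [popMin2] using List.rel_of_pairwise_cons hb hy
  | [], m :: mt =>
    intro y hy
    simp only [List.nil_append, List.mem_cons] at hy
    rcases hy with rfl | hy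
    · simp [popMin2]
    · simpa [popMin2] using List.rel_of_pairwise_cons hm hy
  | b :: bt, m :: mt =>
    intro y hy
    have h1 : ∀ z ∈ bt, b ≤ z := fun z hz => List.rel_of_pairwise_cons hb hz
    have h2 : ∀ z ∈ mt, m ≤ z := fun z hz => List.rel_of_pairwise_cons hm hz
    have hy' : y = b ∨ y ∈ bt ∨ y = m ∨ y ∈ mt := by
      simpa [List.mem_append, List.mem_cons, or_assoc] using hy
    by_cases hbm : b ≤ m <;> simp only [popMin2, hbm, if_true, if_false]
    · rcases hy' with rfl | hy' | rfl | hy'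
      · simp
      · simpa using h1 y hy'
      · simpa using hbm
      · simpa using hbm.trans (h2 y hy')
    · have hmb : m ≤ b := by omega
      rcases hy' with rfl | hy' | rfl | hy'
      · simpa using hmb
      · simpa using hmb.trans (h1 y hy')
      · simp
      · simpa using h2 y hy'

lemma popMin2_perm (base merged : List Int) (h : base ++ merged ≠ []) :
    (base ++ merged).Perm
      ((popMin2 base merged).1 :: ((popMin2 base merged).2.1 ++ (popMin2 base merged).2.2)) := by
  rcases popMin2_cases base merged h with ⟨x, bt, hbase, hr⟩ | ⟨x, mt, hmerged, hr⟩
  · rw [hr, hbase]; simp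
  · rw [hr, hmerged]; exact List.perm_middle

lemma popMin2_sorted (base merged : List Int) (h : base ++ merged ≠ [])
    (hb : base.Pairwise (· ≤ ·)) (hm : merged.Pairwise (· ≤ ·)) :
    (popMin2 base merged).2.1.Pairwise (· ≤ ·) ∧ (popMin2 base merged).2.2.Pairwise (· ≤ ·) := by
  rcases popMin2_cases base merged h with ⟨x, bt, hbase, hr⟩ | ⟨x, mt, hmerged, hr⟩
  · rw [hr]; exact ⟨(hbase ▸ hb).tail, hm⟩
  · rw [hr]; exact ⟨hb, (hmerged ▸ hm).tail⟩

lemma pop_agree (xs base merged : List Int)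
    (hperm : xs.Perm (base ++ merged)) (hne : xs ≠ [])
    (hb : base.Pairwise (· ≤ ·)) (hm : merged.Pairwise (· ≤ ·)) :
    (popA xs).1 = (popMin2 base merged).1 ∧
    (popA xs).2.Perm ((popMin2 base merged).2.1 ++ (popMin2 base merged).2.2) := by
  have hne2 : base ++ merged ≠ [] := fun e => hne (List.Perm.eq_nil (e ▸ hperm))
  obtain ⟨hpa, hmin⟩ := popA_spec xs hne
  have hperm2 := popMin2_perm base merged hne2
  have hmem1 : (popMin2 base merged).1 ∈ xs :=
    hperm.symm.subset (hperm2.symm.subset List.mem_cons_self)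
  have hmem2 : (popA xs).1 ∈ xs := hpa.symm.subset List.mem_cons_self
  have heq : (popA xs).1 = (popMin2 base merged).1 :=
    le_antisymm (hmin _ hmem1) (popMin2_min base merged hb hm _ (hperm.subset hmem2))
  refine ⟨heq, ?_⟩
  have h3 : ((popA xs).1 :: (popA xs).2).Perm
      ((popMin2 base merged).1 :: ((popMin2 base merged).2.1 ++ (popMin2 base merged).2.2)) :=
    hpa.symm.trans (hperm.trans hperm2)
  rw [heq] at h3
  exact h3.cons_inv

lemma pairsOK_mono (base b2 : List Int) (ps sp : List (Int × Int))
    (hOK : PairsOK base ps) (hb : ∀ y ∈ b2, y ∈ base) (hs : sp.Sublist ps) :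
    PairsOK b2 sp :=
  ⟨fun p hp => hOK.1 p (hs.subset hp),
   hOK.2.1.sublist hs,
   fun p hp y hy => hOK.2.2 p (hs.subset hp) y (hb y hy)⟩

lemma pairsOK_append (b2 : List Int) (sp : List (Int × Int)) (a b : Int)
    (hOK : PairsOK b2 sp)
    (hab : a ≤ b)
    (hpa : ∀ p ∈ sp, p.1 ≤ a) (hpb : ∀ p ∈ sp, p.2 ≤ b)
    (hbm : ∀ p ∈ sp, b ≤ pvF p)
    (hbb : ∀ y ∈ b2, b ≤ y) :
    PairsOK b2 (sp ++ [(a, b)]) := by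
  refine ⟨?_, ?_, ?_⟩
  · intro p hp
    rcases List.mem_append.mp hp with hp | hp
    · exact hOK.1 p hp
    · simp at hp; subst hp; exact hab
  · rw [List.pairwise_append]
    refine ⟨hOK.2.1, List.pairwise_singleton _ _, ?_⟩
    intro p hp q hq
    simp at hq; subst hq
    exact ⟨hpa p hp, hpb p hp, hbm p hp⟩
  · intro p hp y hy
    rcases List.mem_append.mp hp with hp | hp
    · exact hOK.2.2 p hp y hy
    · simp at hp; subst hp; exact hbb y hy

lemma inv_after_two_pops (base : List Int) (ps : List (Int × Int))
    (hOK : PairsOK base ps)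
    (h1 : base ++ ps.map pvF ≠ [])
    (h2 : (popMin2 base (ps.map pvF)).2.1 ++ (popMin2 base (ps.map pvF)).2.2 ≠ []) :
    ∃ sp : List (Int × Int),
      (popMin2 (popMin2 base (ps.map pvF)).2.1 (popMin2 base (ps.map pvF)).2.2).2.2 = sp.map pvF ∧
      (∀ y ∈ (popMin2 (popMin2 base (ps.map pvF)).2.1 (popMin2 base (ps.map pvF)).2.2).2.1, y ∈ base) ∧
      sp.Sublist ps ∧
      (∀ p ∈ sp, p.1 ≤ (popMin2 base (ps.map pvF)).1) ∧
      (∀ p ∈ sp, p.2 ≤ (popMin2 (popMin2 base (ps.map pvF)).2.1 (popMin2 base (ps.map pvF)).2.2).1) := by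
  rcases popMin2_cases base (ps.map pvF) h1 with ⟨x, bt, hbase, hr⟩ | ⟨x, mt, hmerged, hr⟩
  · -- first pop from base: base = x :: bt
    rw [hr] at h2 ⊢
    have hx : x ∈ base := by rw [hbase]; exact List.mem_cons_self
    rcases popMin2_cases bt (ps.map pvF) h2 with ⟨x₂, bt', hbt, hr2⟩ | ⟨x₂, mt', hmt, hr2⟩
    · -- second pop from bt
      rw [hr2]
      have hx₂ : x₂ ∈ base := by rw [hbase, hbt]; exact List.mem_cons_of_mem _ List.mem_cons_self
      refine ⟨ps, rfl, ?_, List.Sublist.refl ps, ?_, ?_⟩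
      · intro y hy; rw [hbase, hbt]
        exact List.mem_cons_of_mem _ (List.mem_cons_of_mem _ hy)
      · exact fun p hp => (hOK.1 p hp).trans (hOK.2.2 p hp x hx)
      · exact fun p hp => hOK.2.2 p hp x₂ hx₂
    · -- second pop from merged part: ps = p₁ :: ps₁
      rw [hr2]
      rcases ps with _ | ⟨p₁, ps₁⟩
      · simp at hmt
      · rw [List.map_cons] at hmt
        injection hmt with hfp hmap
        refine ⟨ps₁, hmap.symm, ?_, List.sublist_cons_self p₁ ps₁, ?_, ?_⟩
        · intro y hy; rw [hbase]; exact List.mem_cons_of_mem _ hy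
        · exact fun p hp => (hOK.1 p (List.mem_cons_of_mem _ hp)).trans
            (hOK.2.2 p (List.mem_cons_of_mem _ hp) x hx)
        · intro p hp
          have hrel := List.rel_of_pairwise_cons hOK.2.1 hp
          rw [← hfp]
          exact hrel.2.2
  · -- first pop from merged: ps = p₁ :: ps₁, x = pvF p₁
    rw [hr] at h2 ⊢
    rcases ps with _ | ⟨p₁, ps₁⟩
    · simp at hmerged
    · rw [List.map_cons] at hmerged
      injection hmerged with hfp hmap
      have hOK' : PairsOK base ps₁ := pairsOK_mono base base _ ps₁ hOK (fun y hy => hy)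
        (List.sublist_cons_self p₁ ps₁)
      have hpa1 : ∀ p ∈ ps₁, p.1 ≤ x := by
        intro p hp
        have hrel := List.rel_of_pairwise_cons hOK.2.1 hp
        rw [← hfp]
        exact (hOK.1 p (List.mem_cons_of_mem _ hp)).trans hrel.2.2
      rcases popMin2_cases base mt h2 with ⟨x₂, bt', hbt, hr2⟩ | ⟨x₂, mt', hmt, hr2⟩
      · -- second from base
        rw [hr2]
        have hx₂ : x₂ ∈ base := by rw [hbt]; exact List.mem_cons_self
        refine ⟨ps₁, hmap.symm ▸ rfl, ?_, List.sublist_cons_self p₁ ps₁, hpa1, ?_⟩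
        · intro y hy; rw [hbt]; exact List.mem_cons_of_mem _ hy
        · exact fun p hp => hOK.2.2 p (List.mem_cons_of_mem _ hp) x₂ hx₂
      · -- second also from merged: ps₁ = p₂ :: ps₂
        rw [hr2]
        rcases ps₁ with _ | ⟨p₂, ps₂⟩
        · rw [← hmap] at hmt; simp at hmt
        · rw [← hmap, List.map_cons] at hmt
          injection hmt with hfp2 hmap2
          refine ⟨ps₂, hmap2.symm, fun y hy => hy, ?_, ?_, ?_⟩
          · exact (List.sublist_cons_self p₂ ps₂).trans (List.sublist_cons_self p₁ _)
          · exact fun p hp => hpa1 p (List.mem_cons_of_mem _ hp)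
          · intro p hp
            have hrel := List.rel_of_pairwise_cons hOK'.2.1 hp
            rw [← hfp2]
            exact hrel.2.2

lemma solutionLoop_gt (xs : List Int) (K answer : Int) (h : 1 < xs.length) :
    solutionLoop xs K answer =
      if (popA xs).1 ≥ K then (if (popA (popA xs).2).1 ≥ K then answer else -1)
      else solutionLoop ((popA (popA xs).2).2 ++ [(popA xs).1 + (popA (popA xs).2).1 * 2])
             K (answer + 1) := by
  rw [solutionLoop]
  simp only [dif_pos h]

lemma solutionLoop_le (xs : List Int) (K answer : Int) (h : ¬ 1 < xs.length) :
    solutionLoop xs K answer = if (popA xs).1 ≥ K then answer else -1 := by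
  rw [solutionLoop]
  simp only [dif_neg h]

lemma altLoop_gt (base merged : List Int) (K answer : Int) (h : 1 < base.length + merged.length) :
    altLoop base merged K answer =
      if (popMin2 base merged).1 ≥ K then answer
      else altLoop (popMin2 (popMin2 base merged).2.1 (popMin2 base merged).2.2).2.1
             ((popMin2 (popMin2 base merged).2.1 (popMin2 base merged).2.2).2.2 ++
               [(popMin2 base merged).1 + 2 * (popMin2 (popMin2 base merged).2.1 (popMin2 base merged).2.2).1])
             K (answer + 1) := by
  rw [altLoop]
  simp only [dif_pos h]

lemma altLoop_le (base merged : List Int) (K answer : Int) (h : ¬ 1 < base.length + merged.length) :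
    altLoop base merged K answer = if (popMin2 base merged).1 ≥ K then answer else -1 := by
  rw [altLoop]
  simp only [dif_neg h]

lemma loop_eq (n : Nat) : ∀ (xs base : List Int) (ps : List (Int × Int)) (K answer : Int),
    xs.length ≤ n → xs ≠ [] → xs.Perm (base ++ ps.map pvF) →
    base.Pairwise (· ≤ ·) → PairsOK base ps →
    solutionLoop xs K answer = altLoop base (ps.map pvF) K answer := by
  induction n with
  | zero =>
    intro xs base ps K answer hlen hne _ _ _
    cases xs with
    | nil => exact absurd rfl hne
    | cons a t => simp at hlen
  | succ n ih =>
    intro xs base ps K answer hlen hne hperm hb hOK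
    have hm : (ps.map pvF).Pairwise (· ≤ ·) := pairs_sorted ps hOK.2.1
    have hlen2 : xs.length = base.length + (ps.map pvF).length := by
      rw [hperm.length_eq, List.length_append]
    obtain ⟨heq1, hperm1⟩ := pop_agree xs base (ps.map pvF) hperm hne hb hm
    have hpaxs := popA_spec xs hne
    by_cases hgt : 1 < xs.length
    · have hgt2 : 1 < base.length + (ps.map pvF).length := hlen2 ▸ hgt
      have hne2 : base ++ ps.map pvF ≠ [] := fun e => hne (List.Perm.eq_nil (e ▸ hperm))
      have hlen1 : (popA xs).2.length + 1 = xs.length := popA_length xs hne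
      have hne1 : (popA xs).2 ≠ [] := by
        intro e; rw [e] at hlen1; simp only [List.length_nil] at hlen1; omega
      rw [solutionLoop_gt xs K answer hgt, altLoop_gt base _ K answer hgt2, heq1]
      by_cases hK : (popMin2 base (ps.map pvF)).1 ≥ K
      · rw [if_pos hK, if_pos hK]
        have hmem : (popA (popA xs).2).1 ∈ xs := by
          have h5 := popA_spec (popA xs).2 hne1
          exact hpaxs.1.symm.subset
            (List.mem_cons_of_mem _ (h5.1.symm.subset List.mem_cons_self))
        have : (popMin2 base (ps.map pvF)).1 ≤ (popA (popA xs).2).1 := heq1 ▸ hpaxs.2 _ hmem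
        rw [if_pos (le_trans hK this)]
      · rw [if_neg hK, if_neg hK]
        obtain ⟨hs1, hs2⟩ := popMin2_sorted base (ps.map pvF) hne2 hb hm
        obtain ⟨heq2, hperm2⟩ := pop_agree (popA xs).2 _ _ hperm1 hne1 hs1 hs2
        rw [heq2]
        have h2ne : (popMin2 base (ps.map pvF)).2.1 ++ (popMin2 base (ps.map pvF)).2.2 ≠ [] :=
          fun e => hne1 (List.Perm.eq_nil (e ▸ hperm1))
        obtain ⟨sp, hsp_eq, hsp_base, hsp_sub, hsp_a, hsp_b⟩ :=
          inv_after_two_pops base ps hOK hne2 h2ne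
        set p := popMin2 base (ps.map pvF) with hp
        set q := popMin2 p.2.1 p.2.2 with hq
        have hqperm := popMin2_perm p.2.1 p.2.2 h2ne
        have hbmin : ∀ y ∈ p.2.1 ++ p.2.2, q.1 ≤ y := popMin2_min p.2.1 p.2.2 hs1 hs2
        have hab : p.1 ≤ q.1 := by
          have hq1mem : q.1 ∈ p.2.1 ++ p.2.2 := hqperm.symm.subset List.mem_cons_self
          have : q.1 ∈ base ++ ps.map pvF :=
            (popMin2_perm base (ps.map pvF) hne2).symm.subset (List.mem_cons_of_mem _ hq1mem)
          exact popMin2_min base (ps.map pvF) hb hm _ this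
        have hsubq : ∀ y ∈ q.2.1 ++ q.2.2, y ∈ p.2.1 ++ p.2.2 :=
          fun y hy => hqperm.symm.subset (List.mem_cons_of_mem _ hy)
        have hbm : ∀ p' ∈ sp, q.1 ≤ pvF p' := by
          intro p' hp'
          refine hbmin _ (hsubq _ (List.mem_append.mpr (Or.inr ?_)))
          rw [hsp_eq]; exact List.mem_map_of_mem hp'
        have hbb : ∀ y ∈ q.2.1, q.1 ≤ y :=
          fun y hy => hbmin _ (hsubq _ (List.mem_append.mpr (Or.inl hy)))
        have hOKnew : PairsOK q.2.1 (sp ++ [(p.1, q.1)]) :=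
          pairsOK_append q.2.1 sp p.1 q.1
            (pairsOK_mono base q.2.1 ps sp hOK hsp_base hsp_sub) hab hsp_a hsp_b hbm hbb
        obtain ⟨ht1, ht2⟩ := popMin2_sorted p.2.1 p.2.2 h2ne hs1 hs2
        have hmapnew : (sp ++ [(p.1, q.1)]).map pvF = q.2.2 ++ [p.1 + 2 * q.1] := by
          rw [List.map_append, ← hsp_eq]; rfl
        rw [← hmapnew]
        apply ih
        · have hlen3 : (popA (popA xs).2).2.length + 1 = (popA xs).2.length :=
            popA_length _ hne1
          simp only [List.length_append, List.length_cons, List.length_nil]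
          omega
        · simp
        · have hc : p.1 + q.1 * 2 = p.1 + 2 * q.1 := by ring
          rw [hc]
          have hpermstep : ((popA (popA xs).2).2 ++ [p.1 + 2 * q.1]).Perm
              ((q.2.1 ++ q.2.2) ++ [p.1 + 2 * q.1]) := hperm2.append_right _
          refine hpermstep.trans ?_
          rw [hmapnew, List.append_assoc]
        · exact ht1
        · exact hOKnew
    · rw [solutionLoop_le xs K answer hgt, altLoop_le base _ K answer (hlen2 ▸ hgt), heq1]

-- ===== VERDICT (by name: the statement is the Claim_ definition above) =====
theorem solution_spec : Claim_equal_solution := by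
  intro scoville K _ hpre
  unfold Spec_solution solution solution_alt
  have hsp : (PySem.List.sorted scoville (fun x => x) false).Pairwise (· ≤ ·) :=
    PySem.List.sorted_pairwise scoville (fun x => x)
  have hperm : scoville.Perm
      (PySem.List.sorted scoville (fun x => x) false ++ ([] : List (Int × Int)).map pvF) := by
    simpa using (PySem.List.sorted_perm scoville (fun x => x) false).symm
  have hOK : PairsOK (PySem.List.sorted scoville (fun x => x) false) [] :=
    ⟨by simp, List.Pairwise.nil, by simp⟩
  exact loop_eq scoville.length scoville _ [] K 0 le_rfl hpre hperm hsp hOK
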